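-- pv_equiv track=rewrite | github.com/PrincetonUniversity/Vatic | vatic/data/loaders.py | get_dispatch_types
-- ===== SOURCE A (Python) =====
-- def get_dispatch_types(renew_types):
--     return {
--         'DispatchRenewables': {gen
--                                for gen, gen_type in renew_types.items()
--                                if (gen_type != 'H'
--                                    and gen.split('_')[1] != 'RTPV')},
--
--         'NondispatchRenewables': {gen
--                                   for gen, gen_type in renew_types.items()
--                                   if (gen_type == 'H'
--                                       or gen.split('_')[1] == 'RTPV')},
--
--         'ForecastRenewables': {gen for gen, gen_type in renew_types.items()
--                                if gen_type != 'H' and '_CSP_' not in gen}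
--         }
-- ===== SOURCE B (Python) =====
-- def get_dispatch_types(renew_types):
--     disp, nond, frc = set(), set(), set()
--     for gen, gen_type in renew_types.items():
--         if gen_type == 'H':
--             nond.add(gen)
--         else:
--             if gen.split('_')[1] == 'RTPV':
--                 nond.add(gen)
--             else:
--                 disp.add(gen)
--             if '_CSP_' not in gen:
--                 frc.add(gen)
--     return {'DispatchRenewables': disp,
--             'NondispatchRenewables': nond,
--             'ForecastRenewables': frc}
-- ===== Notes on version B (the rewrite author's own statement) =====
-- stated objective: alternative
-- what changed: Replaces the three independent set-comprehension passes over the dict with a single loop that maintains all three sets at once, splitting each non-H generator name only once.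
import Mathlib
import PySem

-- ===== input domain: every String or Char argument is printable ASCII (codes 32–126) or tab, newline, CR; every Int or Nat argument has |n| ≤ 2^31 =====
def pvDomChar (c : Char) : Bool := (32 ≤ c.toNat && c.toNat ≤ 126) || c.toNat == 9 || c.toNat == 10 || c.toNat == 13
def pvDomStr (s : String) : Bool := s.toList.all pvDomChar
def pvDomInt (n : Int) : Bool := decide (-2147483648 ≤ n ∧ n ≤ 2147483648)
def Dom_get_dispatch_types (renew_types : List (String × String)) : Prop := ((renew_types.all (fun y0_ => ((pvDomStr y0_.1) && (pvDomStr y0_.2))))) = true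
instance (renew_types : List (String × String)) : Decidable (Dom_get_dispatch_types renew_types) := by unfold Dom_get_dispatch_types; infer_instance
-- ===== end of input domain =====

-- B replaces A's three set-comprehension passes by a single loop maintaining the three sets at once (alternative decomposition, same result).

-- ===== PORT A =====
-- gen.split('_')[1]; total form of the index, valid under Pre_ (the split has ≥ 2 pieces there)
def pvTok (g : String) : String := PySem.List.pyGetD ((PySem.Str.split? g "_").getD []) 1 ""

def pvStepDisp (s : List String) (p : String × String) : List String :=
  if p.2 ≠ "H" ∧ pvTok p.1 ≠ "RTPV" then PySem.Set.add s p.1 else s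
def pvStepNond (s : List String) (p : String × String) : List String :=
  if p.2 = "H" ∨ pvTok p.1 = "RTPV" then PySem.Set.add s p.1 else s
def pvStepFrc (s : List String) (p : String × String) : List String :=
  if p.2 ≠ "H" ∧ PySem.Str.isIn "_CSP_" p.1 = false then PySem.Set.add s p.1 else s

def get_dispatch_types (renew_types : List (String × String)) : List (String × List String) :=
  [("DispatchRenewables", renew_types.foldl pvStepDisp PySem.Set.empty),
   ("NondispatchRenewables", renew_types.foldl pvStepNond PySem.Set.empty),
   ("ForecastRenewables", renew_types.foldl pvStepFrc PySem.Set.empty)]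

-- ===== PORT B =====
def pvStepB (st : List String × List String × List String) (p : String × String) :
    List String × List String × List String :=
  if p.2 = "H" then (st.1, PySem.Set.add st.2.1 p.1, st.2.2)
  else
    let dn := if pvTok p.1 = "RTPV" then (st.1, PySem.Set.add st.2.1 p.1)
              else (PySem.Set.add st.1 p.1, st.2.1)
    let f := if PySem.Str.isIn "_CSP_" p.1 then st.2.2 else PySem.Set.add st.2.2 p.1
    (dn.1, dn.2, f)

def get_dispatch_types_alt (renew_types : List (String × String)) : List (String × List String) :=
  let st := renew_types.foldl pvStepB (PySem.Set.empty, PySem.Set.empty, PySem.Set.empty)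
  [("DispatchRenewables", st.1),
   ("NondispatchRenewables", st.2.1),
   ("ForecastRenewables", st.2.2)]

-- ===== PRECONDITION & SPEC =====
-- Pre_ excludes exactly the inputs where Python A raises IndexError: a generator whose
-- type is not 'H' but whose name contains no '_' (so gen.split('_')[1] does not exist).
def Pre_get_dispatch_types (renew_types : List (String × String)) : Prop :=
  ∀ p ∈ renew_types, p.2 ≠ "H" → PySem.Str.isIn "_" p.1 = true
instance (renew_types : List (String × String)) : Decidable (Pre_get_dispatch_types renew_types) := by
  unfold Pre_get_dispatch_types; infer_instance
def pvWitness_get_dispatch_types : (List (String × String)) :=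
  [("Wind_1", "W"), ("PV_RTPV_2", "S"), ("Hydro", "H")]
def Spec_get_dispatch_types (renew_types : List (String × String)) (out : List (String × List String)) : Prop := out = get_dispatch_types_alt renew_types
instance (renew_types : List (String × String)) (out : List (String × List String)) : Decidable (Spec_get_dispatch_types renew_types out) := by unfold Spec_get_dispatch_types; infer_instance

-- ===== CLAIM (what is proved, stated in full; the proofs are below) =====
def Claim_equal_get_dispatch_types : Prop := ∀ (renew_types : List (String × String)), Dom_get_dispatch_types renew_types → Pre_get_dispatch_types renew_types → Spec_get_dispatch_types renew_types (get_dispatch_types renew_types)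

-- ===== LEMMAS AND PROOFS =====
-- B's one-pass fold computes exactly the triple of A's three folds.
theorem pvFoldB_eq (rt : List (String × String)) (d n f : List String) :
    rt.foldl pvStepB (d, n, f) =
      (rt.foldl pvStepDisp d, rt.foldl pvStepNond n, rt.foldl pvStepFrc f) := by
  induction rt generalizing d n f with
  | nil => rfl
  | cons p rest ih =>
    simp only [List.foldl_cons]
    have hstep : pvStepB (d, n, f) p = (pvStepDisp d p, pvStepNond n p, pvStepFrc f p) := by
      by_cases hH : p.2 = "H" <;>
        by_cases hT : pvTok p.1 = "RTPV" <;>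
          by_cases hC : PySem.Chars.isIn ['_', 'C', 'S', 'P', '_'] p.1.toList = true <;>
            simp [pvStepB, pvStepDisp, pvStepNond, pvStepFrc, hH, hT, hC]
    rw [hstep, ih]

-- ===== VERDICT (by name: the statement is the Claim_ definition above) =====
theorem get_dispatch_types_spec : Claim_equal_get_dispatch_types := by
  intro rt _ _
  unfold Spec_get_dispatch_types get_dispatch_types get_dispatch_types_alt
  rw [pvFoldB_eq]
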